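-- pv_equiv track=rewrite | github.com/lonelywolf1981/ad_portal | app/utils/dn.py | dn_first_component_value
-- ===== SOURCE A (Python) =====
-- def dn_first_component_value(dn: str) -> str:
--     """Return first RDN value from a DN (e.g. CN=USB-Deny,OU=... -> USB-Deny)."""
--     s = (dn or "").strip()
--     if not s:
--         return ""
--
--     # Extract first RDN (handle escaped commas)
--     first: list[str] = []
--     esc = False
--     for ch in s:
--         if esc:
--             first.append(ch)
--             esc = False
--             continue
--         if ch == "\\":
--             esc = True
--             continue
--         if ch == ",":
--             break
--         first.append(ch)
--     rdn = "".join(first).strip()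
--
--     if "=" in rdn:
--         _, val = rdn.split("=", 1)
--         val = val.strip()
--     else:
--         val = rdn
--
--     # Unescape common DN escapes
--     val = val.replace("\\,", ",").replace("\\+", "+").replace("\\=", "=").replace('\\"', '"')
--     return val.strip()
-- ===== SOURCE B (Python) =====
-- def dn_first_component_value(dn: str) -> str:
--     """Return first RDN value from a DN (e.g. CN=USB-Deny,OU=... -> USB-Deny)."""
--     s = (dn or "").strip()
--     # Single pass: unescape (drop each escaping backslash), stop at the first
--     # unescaped comma, and start accumulating afresh at the first '=' seen.
--     val: list[str] = []
--     seen_eq = False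
--     esc = False
--     for ch in s:
--         if esc:
--             esc = False
--         elif ch == "\\":
--             esc = True
--             continue
--         elif ch == ",":
--             break
--         if ch == "=" and not seen_eq:
--             seen_eq = True
--             val = []
--             continue
--         val.append(ch)
--     out = "".join(val).strip()
--     out = out.replace("\\,", ",").replace("\\+", "+").replace("\\=", "=").replace('\\"', '"')
--     return out.strip()
-- ===== Notes on version B (the rewrite author's own statement) =====
-- stated objective: alternative
-- what changed: Replaces A's extract-loop + join + strip + membership test + first-separator split pipeline with a single-pass state machine (escaped / seen-separator flags) that accumulates the first RDN's value directly during the scan; the standard DN-unescape replace chain is kept.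
import Mathlib
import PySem

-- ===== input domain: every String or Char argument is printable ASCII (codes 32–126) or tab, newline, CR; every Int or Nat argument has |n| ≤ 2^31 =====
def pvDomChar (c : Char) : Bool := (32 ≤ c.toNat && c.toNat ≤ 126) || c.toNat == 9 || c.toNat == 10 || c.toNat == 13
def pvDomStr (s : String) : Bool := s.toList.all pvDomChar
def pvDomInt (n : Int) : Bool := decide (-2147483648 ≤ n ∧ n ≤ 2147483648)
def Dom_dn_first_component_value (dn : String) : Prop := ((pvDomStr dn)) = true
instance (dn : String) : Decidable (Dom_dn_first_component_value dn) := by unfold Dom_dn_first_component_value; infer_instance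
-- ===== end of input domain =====

-- B extracts the first RDN's value in one pass (escape / comma / first-'=' state machine) instead of
-- A's extract-loop → join → strip → '=' membership test → split; same unescape tail; same return value.

-- ===== PORT A =====
-- A's extraction loop: append chars, drop escaping backslashes, break at the first unescaped comma.
def pvAfirst : List Char → Bool → List Char
  | [], _ => []
  | c :: rest, esc =>
    if esc then c :: pvAfirst rest false
    else if c = '\\' then pvAfirst rest true
    else if c = ',' then []
    else c :: pvAfirst rest false

def dn_first_component_value (dn : String) : String :=
  let s := PySem.Str.strip (if dn = "" then "" else dn)
  if s = "" then ""
  else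
    let rdn := PySem.Str.strip (String.ofList (pvAfirst s.toList false))
    let val :=
      if PySem.Str.isIn "=" rdn then
        -- `_, val = rdn.split("=", 1)`: guarded by the '=' test, the split has exactly two parts
        PySem.Str.strip (((PySem.Str.splitMax? rdn "=" 1).getD []).getD 1 "")
      else rdn
    PySem.Str.strip (PySem.Str.replace (PySem.Str.replace (PySem.Str.replace
      (PySem.Str.replace val "\\," ",") "\\+" "+") "\\=" "=") "\\\"" "\"")

-- ===== PORT B =====
-- B's single-pass machine: esc/seen_eq state, accumulator `val` (list append ≙ `val ++ [c]`).
def pvBloop : List Char → Bool → Bool → List Char → List Char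
  | [], _, _, val => val
  | c :: rest, esc, seen, val =>
    if esc then
      (if c = '=' ∧ seen = false then pvBloop rest false true []
       else pvBloop rest false seen (val ++ [c]))
    else if c = '\\' then pvBloop rest true seen val
    else if c = ',' then val
    else if c = '=' ∧ seen = false then pvBloop rest false true []
    else pvBloop rest false seen (val ++ [c])

def dn_first_component_value_alt (dn : String) : String :=
  let s := PySem.Str.strip (if dn = "" then "" else dn)
  let out := PySem.Str.strip (String.ofList (pvBloop s.toList false false []))
  PySem.Str.strip (PySem.Str.replace (PySem.Str.replace (PySem.Str.replace
    (PySem.Str.replace out "\\," ",") "\\+" "+") "\\=" "=") "\\\"" "\"")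

-- ===== PRECONDITION & SPEC =====
def Spec_dn_first_component_value (dn : String) (out : String) : Prop := out = dn_first_component_value_alt dn
instance (dn : String) (out : String) : Decidable (Spec_dn_first_component_value dn out) := by unfold Spec_dn_first_component_value; infer_instance

-- ===== CLAIM (what is proved, stated in full; the proofs are below) =====
def Claim_equal_dn_first_component_value : Prop := ∀ (dn : String), Dom_dn_first_component_value dn → Spec_dn_first_component_value dn (dn_first_component_value dn)

-- ===== LEMMAS AND PROOFS =====

-- the tail of `t` after its first '='
def pvAfterEq (t : List Char) : List Char := (t.dropWhile (fun c => c ≠ '=')).tail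

theorem pvBloop_seen (cs : List Char) : ∀ (esc : Bool) (val : List Char),
    pvBloop cs esc true val = val ++ pvAfirst cs esc := by
  induction cs with
  | nil => intro esc val; simp [pvBloop, pvAfirst]
  | cons c rest ih =>
    intro esc val
    by_cases he : esc = true
    · subst he; simp [pvBloop, pvAfirst, ih]
    · replace he : esc = false := by cases esc <;> simp_all
      subst he
      by_cases h1 : c = '\\' <;> by_cases h2 : c = ',' <;>
        simp [pvBloop, pvAfirst, h1, h2, ih]

theorem pvBloop_unseen (cs : List Char) : ∀ (esc : Bool) (val : List Char),
    pvBloop cs esc false val =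
      if '=' ∈ pvAfirst cs esc then pvAfterEq (pvAfirst cs esc)
      else val ++ pvAfirst cs esc := by
  induction cs with
  | nil => intro esc val; simp [pvBloop, pvAfirst]
  | cons c rest ih =>
    intro esc val
    by_cases he : esc = true
    · subst he
      by_cases h3 : c = '='
      · subst h3
        simp [pvBloop, pvAfirst, pvBloop_seen, pvAfterEq]
      · have h3' : ¬ '=' = c := fun h => h3 h.symm
        simp [pvBloop, pvAfirst, h3, h3', ih, pvAfterEq, List.dropWhile_cons]
    · replace he : esc = false := by cases esc <;> simp_all
      subst he
      by_cases h1 : c = '\\'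
      · simp [pvBloop, pvAfirst, h1, ih]
      · by_cases h2 : c = ','
        · simp [pvBloop, pvAfirst, h1, h2]
        · by_cases h3 : c = '='
          · subst h3
            simp [pvBloop, pvAfirst, h1, h2, pvBloop_seen, pvAfterEq]
          · have h3' : ¬ '=' = c := fun h => h3 h.symm
            simp [pvBloop, pvAfirst, h1, h2, h3, h3', ih, pvAfterEq, List.dropWhile_cons]


theorem pv_dropWhile_eq_of_mem (t : List Char) (h : '=' ∈ t) :
    t.dropWhile (fun c => c ≠ '=') = '=' :: pvAfterEq t := by
  induction t with
  | nil => simp at h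
  | cons c rest ih =>
    by_cases hc : c = '='
    · subst hc; simp [pvAfterEq]
    · have h' : '=' ∈ rest := by
        rcases List.mem_cons.mp h with h1 | h1
        · exact absurd h1.symm hc
        · exact h1
      rw [List.dropWhile_cons_of_pos (by simpa using hc)]
      rw [pvAfterEq, List.dropWhile_cons_of_pos (by simpa using hc)]
      exact ih h'

theorem pv_go0 (fuel : Nat) (l : List Char) (acc : List (List Char)) :
    PySem.Chars.splitOnMax.go ['='] fuel 0 l [] acc = (l :: acc).reverse := by
  cases fuel with
  | zero => cases l <;> rfl
  | succ f => cases l <;> rfl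

theorem pv_go1 (l : List Char) : ∀ (fuel : Nat) (cur : List Char) (acc : List (List Char)),
    l.length < fuel →
    PySem.Chars.splitOnMax.go ['='] fuel 1 l cur acc =
      if '=' ∈ l then
        (pvAfterEq l :: (cur.reverse ++ l.takeWhile (fun c => c ≠ '=')) :: acc).reverse
      else ((cur.reverse ++ l) :: acc).reverse := by
  induction l with
  | nil =>
    intro fuel cur acc hf
    cases fuel with
    | zero => omega
    | succ f => simp [PySem.Chars.splitOnMax.go]
  | cons c rest ih =>
    intro fuel cur acc hf
    cases fuel with
    | zero => omega
    | succ f =>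
      rw [PySem.Chars.splitOnMax.go]
      by_cases hc : c = '='
      · subst hc
        have hpre : List.isPrefixOf ['='] ('=' :: rest) = true := by simp [List.isPrefixOf]
        simp only [hpre, if_true, one_ne_zero, if_false]
        rw [pv_go0]
        simp [pvAfterEq]
      · have hpre : List.isPrefixOf ['='] (c :: rest) = false := by
          simp [List.isPrefixOf]; exact fun h => absurd h.symm hc
        simp only [hpre, one_ne_zero, if_false, Bool.false_eq_true]
        rw [ih f (c :: cur) acc (by simpa using hf)]
        have hc' : ¬ '=' = c := fun h => hc h.symm
        by_cases hm : '=' ∈ rest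
        · simp [hm, hc', pvAfterEq, List.dropWhile_cons_of_pos, List.takeWhile_cons_of_pos, hc]
        · simp [hm, hc']

theorem pv_take_decomp (A B : List Char) (h : '=' ∉ A) :
    (A ++ '=' :: B).takeWhile (fun c => c ≠ '=') = A ∧
    (A ++ '=' :: B).dropWhile (fun c => c ≠ '=') = '=' :: B := by
  induction A with
  | nil => simp
  | cons a rest ih =>
    have ha : ¬ a = '=' := fun hh => h (hh ▸ List.mem_cons_self)
    have h' : '=' ∉ rest := fun hh => h (List.mem_cons_of_mem _ hh)
    obtain ⟨h1, h2⟩ := ih h'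
    constructor
    · rw [List.cons_append, List.takeWhile_cons_of_pos (by simpa using ha), h1]
    · rw [List.cons_append, List.dropWhile_cons_of_pos (by simpa using ha), h2]

theorem pv_splitOnMax_decomp (A B : List Char) (h : '=' ∉ A) :
    PySem.Chars.splitOnMax (A ++ '=' :: B) ['='] 1 = [A, B] := by
  rw [PySem.Chars.splitOnMax, if_neg (by norm_num)]
  rw [show ((1:Int)).toNat = 1 from rfl]
  rw [pv_go1 (A ++ '=' :: B) ((A ++ '=' :: B).length + 1) [] [] (Nat.lt_succ_self _)]
  have hmem : '=' ∈ A ++ '=' :: B := by simp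
  obtain ⟨h1, h2⟩ := pv_take_decomp A B h
  rw [if_pos hmem, h1, pvAfterEq, h2]
  simp

theorem pv_rstrip_cons (c : Char) (l : List Char) :
    PySem.Chars.rstrip (c :: l) =
      if PySem.Chars.rstrip l = [] then (if PySem.Chars.isspace c then [] else [c])
      else c :: PySem.Chars.rstrip l := by
  simp only [PySem.Chars.rstrip, List.reverse_cons, List.dropWhile_append]
  by_cases h : List.dropWhile PySem.Chars.isspace l.reverse = []
  · simp only [h, List.isEmpty_nil, if_true, List.dropWhile, List.reverse_eq_nil_iff]
    by_cases hc : PySem.Chars.isspace c <;> simp [hc]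
  · simp [h]

theorem pv_rstrip_eq_nil_iff (l : List Char) :
    PySem.Chars.rstrip l = [] ↔ ∀ c ∈ l, PySem.Chars.isspace c := by
  simp [PySem.Chars.rstrip, List.dropWhile_eq_nil_iff]

theorem pv_lstrip_rstrip (l : List Char) :
    PySem.Chars.lstrip (PySem.Chars.rstrip l) = PySem.Chars.rstrip (PySem.Chars.lstrip l) := by
  induction l with
  | nil => rfl
  | cons c rest ih =>
    by_cases hc : PySem.Chars.isspace c
    · rw [pv_rstrip_cons]
      by_cases h0 : PySem.Chars.rstrip rest = []
      · have hall : ∀ x ∈ rest, PySem.Chars.isspace x := (pv_rstrip_eq_nil_iff rest).mp h0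
        have hl : PySem.Chars.lstrip rest = [] := by
          simp [PySem.Chars.lstrip, List.dropWhile_eq_nil_iff]; exact fun a ha => hall a ha
        simp only [h0, if_true, hc, PySem.Chars.lstrip, List.dropWhile_cons_of_pos]
        rw [show List.dropWhile PySem.Chars.isspace rest = PySem.Chars.lstrip rest from rfl, hl]
        rfl
      · simp only [h0, if_false, PySem.Chars.lstrip, List.dropWhile_cons_of_pos, hc] at *
        exact ih
    · have hcb : PySem.Chars.isspace c = false := by simpa using hc
      rw [pv_rstrip_cons]
      by_cases h0 : PySem.Chars.rstrip rest = []
      · simp only [h0, hcb, if_true, Bool.false_eq_true, if_false]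
        have hr : PySem.Chars.lstrip [c] = [c] := by simp [PySem.Chars.lstrip, List.dropWhile, hcb]
        rw [hr]
        rw [show PySem.Chars.lstrip (c :: rest) = List.dropWhile PySem.Chars.isspace (c :: rest) from rfl]
        rw [List.dropWhile_cons_of_neg (by simp [hcb])]
        rw [pv_rstrip_cons]
        simp [h0, hcb]
      · simp only [h0, if_false]
        rw [show PySem.Chars.lstrip (c :: PySem.Chars.rstrip rest) = List.dropWhile PySem.Chars.isspace (c :: PySem.Chars.rstrip rest) from rfl]
        rw [List.dropWhile_cons_of_neg (by simp [hcb])]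
        rw [show PySem.Chars.lstrip (c :: rest) = List.dropWhile PySem.Chars.isspace (c :: rest) from rfl]
        rw [List.dropWhile_cons_of_neg (by simp [hcb])]
        rw [pv_rstrip_cons]
        simp [h0, ih]

theorem pv_rstrip_rstrip (l : List Char) :
    PySem.Chars.rstrip (PySem.Chars.rstrip l) = PySem.Chars.rstrip l := by
  simp [PySem.Chars.rstrip, List.dropWhile_idempotent]

theorem pv_strip_rstrip (l : List Char) :
    PySem.Chars.strip (PySem.Chars.rstrip l) = PySem.Chars.strip l := by
  simp only [PySem.Chars.strip]
  rw [pv_lstrip_rstrip, pv_rstrip_rstrip]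

theorem pv_dropWhile_sp_append (u v : List Char) :
    List.dropWhile PySem.Chars.isspace (u ++ '=' :: v) =
      List.dropWhile PySem.Chars.isspace u ++ '=' :: v := by
  rw [List.dropWhile_append]
  by_cases h : (List.dropWhile PySem.Chars.isspace u).isEmpty
  · rw [if_pos h, List.dropWhile_cons_of_neg (by decide)]
    rw [List.isEmpty_iff] at h; rw [h]; rfl
  · rw [if_neg (by simpa using h)]

theorem pv_rev_mid (x y : List Char) : (x ++ '=' :: y).reverse = y.reverse ++ '=' :: x.reverse := by
  simp

theorem pv_strip_decomp (a b : List Char) :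
    PySem.Chars.strip (a ++ '=' :: b) =
      a.dropWhile PySem.Chars.isspace ++ '=' :: PySem.Chars.rstrip b := by
  simp only [PySem.Chars.strip, PySem.Chars.lstrip, PySem.Chars.rstrip]
  rw [pv_dropWhile_sp_append, pv_rev_mid, pv_dropWhile_sp_append, pv_rev_mid]
  simp

theorem pv_mem_of_mem_strip {c : Char} {t : List Char} (h : c ∈ PySem.Chars.strip t) : c ∈ t := by
  have h1 : c ∈ PySem.Chars.lstrip t := by
    have hsuf := List.dropWhile_suffix (l := (PySem.Chars.lstrip t).reverse) PySem.Chars.isspace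
    have h2 : c ∈ (List.dropWhile PySem.Chars.isspace (PySem.Chars.lstrip t).reverse) := by
      simpa [PySem.Chars.strip, PySem.Chars.rstrip] using h
    exact List.mem_reverse.mp (hsuf.subset h2)
  exact (List.dropWhile_suffix (l := t) PySem.Chars.isspace).subset h1

theorem pv_val_eq (t : List Char) :
    (if PySem.Str.isIn "=" (PySem.Str.strip (String.ofList t)) = true then
        PySem.Str.strip (((PySem.Str.splitMax? (PySem.Str.strip (String.ofList t)) "=" 1).getD []).getD 1 "")
      else PySem.Str.strip (String.ofList t))
    = PySem.Str.strip (String.ofList (if '=' ∈ t then pvAfterEq t else t)) := by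
  by_cases hm : '=' ∈ t
  · -- decompose t at its first '='
    have hsplit : t = t.takeWhile (fun c => c ≠ '=') ++ '=' :: pvAfterEq t := by
      conv_lhs => rw [← List.takeWhile_append_dropWhile (p := fun c => c ≠ '=') (l := t)]
      rw [pv_dropWhile_eq_of_mem t hm]
    have hA0 : '=' ∉ t.takeWhile (fun c => c ≠ '=') := by
      intro hmem
      have := List.mem_takeWhile_imp hmem
      simp at this
    have hstrip : PySem.Chars.strip t =
        (t.takeWhile (fun c => c ≠ '=')).dropWhile PySem.Chars.isspace ++
          '=' :: PySem.Chars.rstrip (pvAfterEq t) := by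
      conv_lhs => rw [hsplit]
      exact pv_strip_decomp _ _
    have hA' : '=' ∉ (t.takeWhile (fun c => c ≠ '=')).dropWhile PySem.Chars.isspace := by
      intro hmem
      exact hA0 ((List.dropWhile_suffix PySem.Chars.isspace).subset hmem)
    have hrdnl : (PySem.Str.strip (String.ofList t)).toList = PySem.Chars.strip t := by
      simp
    have hIn : PySem.Str.isIn "=" (PySem.Str.strip (String.ofList t)) = true := by
      rw [PySem.Str.isIn_iff_infix, show ("=" : String).toList = ['='] from rfl, hrdnl, hstrip]
      refine (List.singleton_infix_iff _ _).mpr ?_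
      simp
    rw [if_pos hIn, if_pos hm]
    have hsplitmax : PySem.Str.splitMax? (PySem.Str.strip (String.ofList t)) "=" 1 =
        some [String.ofList ((t.takeWhile (fun c => c ≠ '=')).dropWhile PySem.Chars.isspace),
              String.ofList (PySem.Chars.rstrip (pvAfterEq t))] := by
      rw [PySem.Str.splitMax?, PySem.Chars.splitMax?]
      rw [if_neg (by simp)]
      rw [hrdnl, hstrip]
      rw [show ("=" : String).toList = ['='] from rfl]
      rw [pv_splitOnMax_decomp _ _ hA']
      rfl
    rw [hsplitmax]
    simp only [Option.getD_some, List.getD, List.getElem?_cons_succ, List.getElem?_cons_zero,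
      Option.getD_some]
    apply String.toList_inj.mp
    simp only [PySem.Str.toList_strip, String.toList_ofList]
    exact pv_strip_rstrip _
  · have hIn : PySem.Str.isIn "=" (PySem.Str.strip (String.ofList t)) = false := by
      rw [← Bool.not_eq_true, PySem.Str.isIn_iff_infix]
      intro hinf
      rw [show ("=" : String).toList = ['='] from rfl] at hinf
      have : '=' ∈ (PySem.Str.strip (String.ofList t)).toList :=
        (List.singleton_infix_iff _ _).mp hinf
      rw [PySem.Str.toList_strip, String.toList_ofList] at this
      exact hm (pv_mem_of_mem_strip this)
    rw [hIn, if_neg Bool.false_ne_true, if_neg hm]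

-- ===== VERDICT (by name: the statement is the Claim_ definition above) =====
theorem dn_first_component_value_spec : Claim_equal_dn_first_component_value := by
  intro dn _
  unfold Spec_dn_first_component_value
  simp only [dn_first_component_value, dn_first_component_value_alt]
  by_cases hs0 : PySem.Str.strip (if dn = "" then "" else dn) = ""
  · rw [if_pos hs0, hs0]
    decide
  · rw [if_neg hs0]
    rw [pvBloop_unseen]
    rw [show ∀ (l : List Char), ([] ++ l) = l from fun _ => rfl]
    rw [pv_val_eq]
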